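-- pv_equiv track=rewrite | github.com/Uaemextop/HuaweiFirmwareTool | tools/fw_rootfs_decompile.py | _filter_clid_commands
-- ===== SOURCE A (Python) =====
-- def _filter_clid_commands(strings: list[str]) -> list[str]:
--     """Extract CLI command-related strings from clid."""
--     cmds = []
--     for s in strings:
--         if any(kw in s for kw in ["enable", "disable", "display", "quit",
--                                    "config", "diagnose", "ping", "trace",
--                                    "reboot", "save", "reset", "shell",
--                                    "interface", "system", "service",
--                                    "port", "wan", "vlan", "ont"]):
--             cmds.append(s)
--         elif s.startswith("WAP_") or s.startswith("CLI_") or s.startswith("CMD_"):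
--             cmds.append(s)
--     return cmds
-- ===== SOURCE B (Python) =====
-- _KEYWORDS = ("enable", "disable", "display", "quit",
--              "config", "diagnose", "ping", "trace",
--              "reboot", "save", "reset", "shell",
--              "interface", "system", "service",
--              "port", "wan", "vlan", "ont")
-- _PREFIXES = ("WAP_", "CLI_", "CMD_")
--
--
-- def _filter_clid_commands(strings: list[str]) -> list[str]:
--     """Extract CLI command-related strings from clid."""
--     keep = set()
--     for kw in _KEYWORDS:
--         for i, s in enumerate(strings):
--             if kw in s:
--                 keep.add(i)
--     for i, s in enumerate(strings):
--         if s.startswith(_PREFIXES):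
--             keep.add(i)
--     return [s for i, s in enumerate(strings) if i in keep]
-- ===== Notes on version B (the rewrite author's own statement) =====
-- stated objective: alternative
-- what changed: Inverts the loop nesting: one marking pass over the whole list per keyword (plus one tuple-startswith prefix pass) records matching indices in a set, and a final ordered pass collects the marked strings, instead of a per-string any()-over-keywords test inside an if/elif append loop.
import Mathlib
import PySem

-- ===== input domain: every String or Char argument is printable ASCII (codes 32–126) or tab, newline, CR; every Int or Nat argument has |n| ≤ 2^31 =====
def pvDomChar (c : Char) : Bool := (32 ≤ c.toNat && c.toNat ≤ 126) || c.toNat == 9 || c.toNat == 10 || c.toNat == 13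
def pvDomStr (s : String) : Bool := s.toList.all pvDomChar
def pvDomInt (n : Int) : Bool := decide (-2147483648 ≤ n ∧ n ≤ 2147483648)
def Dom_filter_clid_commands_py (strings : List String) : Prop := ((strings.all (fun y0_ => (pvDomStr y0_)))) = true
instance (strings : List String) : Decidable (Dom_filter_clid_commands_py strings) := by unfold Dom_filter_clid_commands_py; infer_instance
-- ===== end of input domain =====

-- B inverts the loop nesting: one marking pass over the list per keyword (and one
-- prefix pass) records matching indices in a set, then one ordered pass collects
-- the marked strings; objective: alternative algorithm, same cost.

-- ===== PORT A =====
def filter_clid_commands_py (strings : List String) : List String :=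
  strings.foldl (fun cmds s =>
    if (["enable", "disable", "display", "quit",
         "config", "diagnose", "ping", "trace",
         "reboot", "save", "reset", "shell",
         "interface", "system", "service",
         "port", "wan", "vlan", "ont"] : List String).any
          (fun kw => PySem.Str.isIn kw s) then
      cmds ++ [s]
    else if PySem.Str.startswith s "WAP_" || PySem.Str.startswith s "CLI_"
            || PySem.Str.startswith s "CMD_" then
      cmds ++ [s]
    else cmds) []

-- ===== PORT B =====
def pvKeywords : List String :=
  ["enable", "disable", "display", "quit",
   "config", "diagnose", "ping", "trace",
   "reboot", "save", "reset", "shell",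
   "interface", "system", "service",
   "port", "wan", "vlan", "ont"]
def pvPrefixes : List String := ["WAP_", "CLI_", "CMD_"]

def filter_clid_commands_py_alt (strings : List String) : List String :=
  -- for kw in _KEYWORDS: for i, s in enumerate(strings): if kw in s: keep.add(i)
  let keep1 : PySem.Set Int :=
    pvKeywords.foldl (fun keep kw =>
      (PySem.List.enumerate strings).foldl (fun keep p =>
        if PySem.Str.isIn kw p.2 then PySem.Set.add keep p.1 else keep) keep)
      (PySem.Set.ofList [])
  -- for i, s in enumerate(strings): if s.startswith(_PREFIXES): keep.add(i)
  let keep : PySem.Set Int :=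
    (PySem.List.enumerate strings).foldl (fun keep p =>
      if pvPrefixes.any (fun pre => PySem.Str.startswith p.2 pre) then
        PySem.Set.add keep p.1 else keep) keep1
  -- [s for i, s in enumerate(strings) if i in keep]
  (((PySem.List.enumerate strings).filter (fun p => PySem.Set.contains keep p.1)).map (fun p => p.2))

-- ===== PRECONDITION & SPEC =====
def Spec_filter_clid_commands_py (strings : List String) (out : List String) : Prop := out = filter_clid_commands_py_alt strings
instance (strings : List String) (out : List String) : Decidable (Spec_filter_clid_commands_py strings out) := by unfold Spec_filter_clid_commands_py; infer_instance

-- ===== CLAIM =====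
def Claim_equal_filter_clid_commands_py : Prop := ∀ (strings : List String), Dom_filter_clid_commands_py strings → Spec_filter_clid_commands_py strings (filter_clid_commands_py strings)

-- ===== LEMMAS AND PROOFS =====

-- the predicate both programs decide per string
def pvPred (s : String) : Bool :=
  pvKeywords.any (fun kw => PySem.Str.isIn kw s)
    || pvPrefixes.any (fun pre => PySem.Str.startswith s pre)

-- membership after one marking pass
lemma mem_markFold (l : List (Int × String)) (c : Int × String → Bool)
    (s : PySem.Set Int) (x : Int) :
    (x ∈ l.foldl (fun keep p => if c p then PySem.Set.add keep p.1 else keep) s) ↔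
      x ∈ s ∨ ∃ p ∈ l, c p ∧ x = p.1 := by
  induction l generalizing s with
  | nil => simp
  | cons q t ih =>
    simp only [List.foldl_cons]
    by_cases h : c q = true
    · rw [if_pos h, ih]
      simp only [PySem.Set.mem_add, List.mem_cons]
      constructor
      · rintro (⟨hs | hx⟩ | ⟨p, hp, hc, hx⟩)
        · exact Or.inl hs
        · exact Or.inr ⟨q, Or.inl rfl, h, hx⟩
        · exact Or.inr ⟨p, Or.inr hp, hc, hx⟩
      · rintro (hs | ⟨p, (rfl | hp), hc, hx⟩)
        · exact Or.inl (Or.inl hs)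
        · exact Or.inl (Or.inr hx)
        · exact Or.inr ⟨p, hp, hc, hx⟩
    · rw [if_neg h, ih]
      simp only [List.mem_cons]
      constructor
      · rintro (hs | ⟨p, hp, hc, hx⟩)
        · exact Or.inl hs
        · exact Or.inr ⟨p, Or.inr hp, hc, hx⟩
      · rintro (hs | ⟨p, (rfl | hp), hc, hx⟩)
        · exact Or.inl hs
        · exact absurd hc h
        · exact Or.inr ⟨p, hp, hc, hx⟩

-- membership after the keyword-major passes
lemma mem_kwFold (kws : List String) (l : List (Int × String))
    (s : PySem.Set Int) (x : Int) :
    (x ∈ kws.foldl (fun keep kw =>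
        l.foldl (fun keep p =>
          if PySem.Str.isIn kw p.2 then PySem.Set.add keep p.1 else keep) keep) s) ↔
      x ∈ s ∨ ∃ p ∈ l, (kws.any (fun kw => PySem.Str.isIn kw p.2)) ∧ x = p.1 := by
  induction kws generalizing s with
  | nil => simp
  | cons k t ih =>
    simp only [List.foldl_cons]
    rw [ih]
    rw [mem_markFold]
    simp only [List.any_cons, Bool.or_eq_true, List.any_eq_true]
    constructor
    · rintro (⟨hs | ⟨p, hp, hc, hx⟩⟩ | ⟨p, hp, hc, hx⟩)
      · exact Or.inl hs
      · exact Or.inr ⟨p, hp, Or.inl hc, hx⟩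
      · exact Or.inr ⟨p, hp, Or.inr hc, hx⟩
    · rintro (hs | ⟨p, hp, (hc | hc), hx⟩)
      · exact Or.inl (Or.inl hs)
      · exact Or.inl (Or.inr ⟨p, hp, hc, hx⟩)
      · exact Or.inr ⟨p, hp, hc, hx⟩

-- the finished keep set holds exactly the indices of strings satisfying pvPred
lemma mem_keep (strings : List String) (x : Int) :
    (x ∈ (PySem.List.enumerate strings).foldl (fun keep p =>
        if pvPrefixes.any (fun pre => PySem.Str.startswith p.2 pre) then
          PySem.Set.add keep p.1 else keep)
      (pvKeywords.foldl (fun keep kw =>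
        (PySem.List.enumerate strings).foldl (fun keep p =>
          if PySem.Str.isIn kw p.2 then PySem.Set.add keep p.1 else keep) keep)
        (PySem.Set.ofList []))) ↔
      ∃ p ∈ PySem.List.enumerate strings, pvPred p.2 ∧ x = p.1 := by
  rw [mem_markFold, mem_kwFold]
  simp only [PySem.Set.ofList, PySem.Set.empty, List.foldl_nil, List.not_mem_nil, false_or]
  constructor
  · rintro (⟨p, hp, hc, hx⟩ | ⟨p, hp, hc, hx⟩)
    · exact ⟨p, hp, by unfold pvPred; rw [hc, Bool.true_or], hx⟩
    · exact ⟨p, hp, by unfold pvPred; rw [hc, Bool.or_true], hx⟩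
  · rintro ⟨p, hp, hc, hx⟩
    by_cases hk : (pvKeywords.any (fun kw => PySem.Str.isIn kw p.2)) = true
    · exact Or.inl ⟨p, hp, hk, hx⟩
    · refine Or.inr ⟨p, hp, ?_, hx⟩
      unfold pvPred at hc
      simp only [Bool.or_eq_true] at hc
      exact hc.resolve_left hk

-- on the enumeration of strings, membership in keep is pvPred of the string
lemma contains_keep (strings : List String) (p : Int × String)
    (hp : p ∈ PySem.List.enumerate strings) :
    PySem.Set.contains ((PySem.List.enumerate strings).foldl (fun keep q =>
        if pvPrefixes.any (fun pre => PySem.Str.startswith q.2 pre) then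
          PySem.Set.add keep q.1 else keep)
      (pvKeywords.foldl (fun keep kw =>
        (PySem.List.enumerate strings).foldl (fun keep q =>
          if PySem.Str.isIn kw q.2 then PySem.Set.add keep q.1 else keep) keep)
        (PySem.Set.ofList []))) p.1 = pvPred p.2 := by
  obtain ⟨k, hk, rfl⟩ := (PySem.List.mem_enumerate_iff _ _ _).mp hp
  apply Bool.eq_iff_iff.mpr
  rw [PySem.Set.contains_iff, mem_keep]
  constructor
  · rintro ⟨q, hq, hcq, hx⟩
    obtain ⟨k', hk', rfl⟩ := (PySem.List.mem_enumerate_iff _ _ _).mp hq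
    simp only at hx
    have : k = k' := by omega
    subst this
    exact hcq
  · intro h
    exact ⟨_, hp, h, rfl⟩

-- filtering the enumeration by pvPred of the string then projecting = filtering strings
lemma filter_enumerate (strings : List String) (s : Int) :
    (((PySem.List.enumerate strings s).filter (fun p => pvPred p.2)).map (fun p => p.2))
      = strings.filter pvPred := by
  induction strings generalizing s with
  | nil => simp [PySem.List.enumerate]
  | cons x t ih =>
    rw [PySem.List.enumerate_cons]
    by_cases h : pvPred x = true
    · simp [h, ih]
    · simp [h, ih]

-- B computes strings.filter pvPred
lemma alt_eq_filter (strings : List String) :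
    filter_clid_commands_py_alt strings = strings.filter pvPred := by
  show (((PySem.List.enumerate strings).filter (fun p =>
      PySem.Set.contains ((PySem.List.enumerate strings).foldl (fun keep q =>
          if pvPrefixes.any (fun pre => PySem.Str.startswith q.2 pre) then
            PySem.Set.add keep q.1 else keep)
        (pvKeywords.foldl (fun keep kw =>
          (PySem.List.enumerate strings).foldl (fun keep q =>
            if PySem.Str.isIn kw q.2 then PySem.Set.add keep q.1 else keep) keep)
          (PySem.Set.ofList []))) p.1)).map (fun p => p.2)) = strings.filter pvPred
  rw [List.filter_congr (fun p hp => contains_keep strings p hp)]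
  exact filter_enumerate strings 0

-- A's loop body appends exactly when pvPred holds
lemma body_eq (cmds : List String) (s : String) :
    (if (pvKeywords.any (fun kw => PySem.Str.isIn kw s)) then cmds ++ [s]
     else if PySem.Str.startswith s "WAP_" || PySem.Str.startswith s "CLI_"
             || PySem.Str.startswith s "CMD_" then cmds ++ [s]
     else cmds)
    = if pvPred s then cmds ++ [s] else cmds := by
  unfold pvPred pvPrefixes
  cases h1 : pvKeywords.any (fun kw => PySem.Str.isIn kw s) <;>
    cases h2 : PySem.Str.startswith s "WAP_" <;>
    cases h3 : PySem.Str.startswith s "CLI_" <;>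
    cases h4 : PySem.Str.startswith s "CMD_" <;> simp_all [List.any]

-- A computes strings.filter pvPred
lemma a_eq_filter (strings : List String) :
    filter_clid_commands_py strings = strings.filter pvPred := by
  unfold filter_clid_commands_py
  rw [show (["enable", "disable", "display", "quit",
         "config", "diagnose", "ping", "trace",
         "reboot", "save", "reset", "shell",
         "interface", "system", "service",
         "port", "wan", "vlan", "ont"] : List String) = pvKeywords from rfl]
  calc strings.foldl (fun cmds s =>
        if (pvKeywords.any (fun kw => PySem.Str.isIn kw s)) then cmds ++ [s]
        else if PySem.Str.startswith s "WAP_" || PySem.Str.startswith s "CLI_"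
                || PySem.Str.startswith s "CMD_" then cmds ++ [s]
        else cmds) []
      = strings.foldl (fun cmds s => if pvPred s then cmds ++ [s] else cmds) [] :=
        PySem.List.foldl_congr_mem _ _ _ _ (fun acc x _ => body_eq acc x)
    _ = [] ++ strings.filter pvPred := PySem.List.foldl_append_if_eq_filter _ _ _
    _ = strings.filter pvPred := by simp

-- ===== VERDICT =====
theorem filter_clid_commands_py_spec : Claim_equal_filter_clid_commands_py := by
  intro strings _
  unfold Spec_filter_clid_commands_py
  rw [a_eq_filter, alt_eq_filter]
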